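-- pv_equiv track=rewrite | github.com/Huvinesh-Rajendran-12/my-python-playground | problem_set/category.py | count_category
-- ===== SOURCE A (Python) =====
-- def count_category(categories: list[tuple[int, str]]) -> int:
--     category_counts = {}
--     for category in categories:
--         if category[1] not in category_counts:
--             category_counts[category[1]] = 1
--         else:
--             category_counts[category[1]] += 1
--     sorted_category_counts = sorted(category_counts.items(), key=lambda x: x[1], reverse=True)
--     ans = [item[0] for item in sorted_category_counts][0]
--     return ans
-- ===== SOURCE B (Python) =====
-- def count_category(categories: list[tuple[int, str]]) -> int:
--     counts = {}
--     for _, label in categories: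
--         counts[label] = counts.get(label, 0) + 1
--     return max(counts, key=lambda c: counts[c])
-- ===== Notes on version B (the rewrite author's own statement) =====
-- stated objective: simpler
-- what changed: Instead of sorting all distinct labels by count descending and taking the first, B finds the answer with a single max pass over the counts dict (first-encountered key with the highest count, matching A's stable-sort tie-breaking); Pre_ excludes the empty list, on which A raises IndexError and B raises ValueError.
import Mathlib
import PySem

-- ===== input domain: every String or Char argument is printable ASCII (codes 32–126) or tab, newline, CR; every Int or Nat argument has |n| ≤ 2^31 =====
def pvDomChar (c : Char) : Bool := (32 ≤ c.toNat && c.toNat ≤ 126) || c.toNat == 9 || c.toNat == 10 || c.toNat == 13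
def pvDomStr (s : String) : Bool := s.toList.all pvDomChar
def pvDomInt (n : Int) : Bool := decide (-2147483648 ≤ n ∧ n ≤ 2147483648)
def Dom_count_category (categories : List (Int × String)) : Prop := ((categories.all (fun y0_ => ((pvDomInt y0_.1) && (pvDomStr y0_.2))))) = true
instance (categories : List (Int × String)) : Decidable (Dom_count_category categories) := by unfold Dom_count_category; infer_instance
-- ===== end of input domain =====

-- B replaces A's descending sort over the distinct labels by a single max pass over the
-- counts dict (same first-inserted tie-breaking); objective: simpler.


-- ===== PORT A =====
def count_category (categories : List (Int × String)) : String :=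
  let category_counts := categories.foldl
    (fun d category =>
      if d.contains category.2 = false then d.insert category.2 (1 : Int)
      else d.insert category.2 (d.getD category.2 (0 : Int) + 1))
    PySem.Dict.empty
  let sorted_category_counts := PySem.List.sorted category_counts.items (fun x => x.2) true
  -- [item[0] for item in …][0]; pyGet? is none exactly where Python raises IndexError (excluded by Pre_)
  (PySem.List.pyGet? (sorted_category_counts.map (fun (item : String × Int) => item.1)) 0).getD ""

-- ===== PORT B =====
def count_category_alt (categories : List (Int × String)) : String :=
  let counts := categories.foldl
    (fun d c => d.insert c.2 (d.getD c.2 (0 : Int) + 1)) PySem.Dict.empty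
  -- max(counts, key=…): none exactly where Python raises ValueError on an empty dict (excluded by Pre_)
  (PySem.List.max? counts.keys (fun c => counts.getD c (0 : Int))).getD ""

-- ===== PRECONDITION & SPEC =====
-- Pre_ excludes only the empty list, on which A raises IndexError (and B raises ValueError).
def Pre_count_category (categories : List (Int × String)) : Prop := categories ≠ []
instance (categories : List (Int × String)) : Decidable (Pre_count_category categories) := by unfold Pre_count_category; infer_instance
def pvWitness_count_category : (List (Int × String)) := [(1, "a"), (2, "b"), (3, "a")]

def Spec_count_category (categories : List (Int × String)) (out : String) : Prop := out = count_category_alt categories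
instance (categories : List (Int × String)) (out : String) : Decidable (Spec_count_category categories out) := by unfold Spec_count_category; infer_instance

-- ===== CLAIM (what is proved, stated in full; the proofs are below) =====
def Claim_equal_count_category : Prop := ∀ (categories : List (Int × String)), Dom_count_category categories → Pre_count_category categories → Spec_count_category categories (count_category categories)

-- ===== LEMMAS AND PROOFS =====

-- xs[0] is the head (when it exists)
theorem pyGet?_zero {α : Type} (xs : List α) : PySem.List.pyGet? xs 0 = xs.head? := by
  cases xs <;> simp [PySem.List.pyGet?, PySem.List.pyIdx?]

-- head of the descending insertion-sort fold = Python-max fold (first maximum wins in both)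
theorem head?_foldl_insertBy {α : Type} (key : α → Int) :
    ∀ (l : List α) (acc : List α),
      (l.foldl (fun acc x => PySem.List.insertBy (fun a b => decide (key b < key a)) x acc) acc).head?
        = l.foldl (fun m x => match m with
            | none => some x
            | some m => if key m < key x then some x else some m) acc.head? := by
  intro l
  induction l with
  | nil => intro acc; rfl
  | cons x t ih =>
    intro acc
    simp only [List.foldl_cons]
    rw [ih]
    congr 1
    cases acc with
    | nil => simp [PySem.List.insertBy]
    | cons h hs =>
      simp only [PySem.List.insertBy, List.head?_cons]
      by_cases hc : key h < key x <;> simp [hc]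

theorem head?_sorted_rev_eq_max? {α : Type} (xs : List α) (key : α → Int) :
    (PySem.List.sorted xs key true).head? = PySem.List.max? xs key := by
  rw [PySem.List.sorted_rev_eq_foldl_insertBy]
  simpa using head?_foldl_insertBy key xs []

-- max over a mapped list = mapped max with the composed key (same first-extremal choice)
theorem max?_map {β α : Type} (f : β → α) (key : α → Int) :
    ∀ (l : List β) (m : Option β),
      (l.foldl (fun acc x => match acc with
          | none => some x
          | some c => if key (f c) < key (f x) then some x else some c) m).map f
        = ((l.map f).foldl (fun acc y => match acc with
          | none => some y
          | some c => if key c < key y then some y else some c) (m.map f)) := by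
  intro l
  induction l with
  | nil => intro m; rfl
  | cons x t ih =>
    intro m
    simp only [List.map_cons, List.foldl_cons]
    rw [ih]
    congr 1
    cases m with
    | none => rfl
    | some c => by_cases hc : key (f c) < key (f x) <;> simp [hc]

theorem max?_map' {β α : Type} (l : List β) (f : β → α) (key : α → Int) :
    PySem.List.max? (l.map f) key = (PySem.List.max? l (fun b => key (f b))).map f := by
  simp only [PySem.List.max?]
  exact (max?_map f key l none).symm

-- ===== VERDICT (by name: the statement is the Claim_ definition above) =====
theorem count_category_spec : Claim_equal_count_category := by
  intro categories _ _
  unfold Spec_count_category count_category count_category_alt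
  have hdict : categories.foldl
      (fun d category =>
        if d.contains category.2 = false then d.insert category.2 (1 : Int)
        else d.insert category.2 (d.getD category.2 (0 : Int) + 1))
      PySem.Dict.empty
      = categories.foldl (fun d c => d.insert c.2 (d.getD c.2 (0 : Int) + 1)) PySem.Dict.empty := by
    apply List.foldl_ext
    intro d c _
    by_cases h : d.contains c.2 = false
    · rw [if_pos h, PySem.Dict.getD_of_not_contains d (0 : Int) h]
      norm_num
    · rw [if_neg h]
  rw [hdict]
  dsimp only
  set d := categories.foldl (fun d c => d.insert c.2 (d.getD c.2 (0 : Int) + 1)) PySem.Dict.empty with hd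
  have hnd : d.keys.Nodup := by
    rw [hd]
    exact PySem.Dict.nodup_keys_foldl_insert_key categories (fun c => c.2)
      (fun d c => d.getD c.2 (0 : Int) + 1) PySem.Dict.empty (by simp [PySem.Dict.keys_empty])
  have hitems := PySem.Dict.items_eq_map_keys d hnd (0 : Int)
  rw [pyGet?_zero, List.head?_map, head?_sorted_rev_eq_max?, hitems,
    max?_map' d.keys (fun k => (k, d.getD k (0 : Int))) (fun p => p.2)]
  cases PySem.List.max? d.keys fun b => d.getD b (0 : Int) <;> simp
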